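-- pv_equiv track=rewrite | github.com/SKNETWORKS-FAMILY-AICAMP/SKN17-3rd-1Team | final_app.py | limit_chars
-- ===== SOURCE A (Python) =====
-- from typing import List, Tuple, Optional, Dict
--
-- def limit_chars(items: List[Dict], key="text", cap=1000) -> List[str]:
--     out=[]; used=0
--     for it in items:
--         t=(it.get(key) or "").strip()
--         if not t: continue
--         if used + len(t) > cap: break
--         out.append(t); used += len(t)
--     return out
-- ===== SOURCE B (Python) =====
-- def limit_chars(items, key="text", cap=1000):
--     texts = [t for t in (((it.get(key) or "").strip()) for it in items) if t]
--     sums, s = [], 0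
--     for t in texts:
--         s += len(t)
--         sums.append(s)
--     k = 0
--     while k < len(sums) and sums[k] <= cap:
--         k += 1
--     return texts[:k]
-- ===== Notes on version B (the rewrite author's own statement) =====
-- stated objective: idiomatic
-- what changed: Replaces the single loop with a running 'used' accumulator and break by a three-stage pipeline: filter the nonempty stripped texts, build their prefix-sum list, then return the slice texts[:k] where k counts leading prefix sums <= cap.
import Mathlib
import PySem

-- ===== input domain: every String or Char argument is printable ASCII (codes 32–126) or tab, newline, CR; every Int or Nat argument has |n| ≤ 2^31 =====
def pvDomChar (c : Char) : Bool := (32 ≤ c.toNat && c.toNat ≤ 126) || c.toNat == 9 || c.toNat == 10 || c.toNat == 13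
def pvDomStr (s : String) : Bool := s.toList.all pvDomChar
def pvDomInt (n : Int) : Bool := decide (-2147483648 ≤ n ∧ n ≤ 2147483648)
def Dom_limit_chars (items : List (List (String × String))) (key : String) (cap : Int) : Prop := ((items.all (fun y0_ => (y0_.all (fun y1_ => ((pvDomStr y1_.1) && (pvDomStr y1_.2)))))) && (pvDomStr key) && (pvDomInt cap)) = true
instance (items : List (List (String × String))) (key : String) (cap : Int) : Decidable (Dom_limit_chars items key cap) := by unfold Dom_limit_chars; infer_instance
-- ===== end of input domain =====

-- B restructures A's break-loop as filter -> prefix sums -> take-prefix slice (idiomatic decomposition, same cost).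


-- ===== PORT A =====
-- t = (it.get(key) or "").strip() : first-match lookup, default "", then strip
def pvStripOf (it : List (String × String)) (key : String) : String :=
  PySem.Str.strip ((List.lookup key it).getD "")

-- the for-loop with 'continue'/'break', carrying out and used
def pvGoA (key : String) (cap : Int) :
    List (List (String × String)) → List String → Int → List String
  | [], out, _ => out
  | it :: rest, out, used =>
    let t := pvStripOf it key
    if t = "" then pvGoA key cap rest out used
    else if used + (t.length : Int) > cap then out
    else pvGoA key cap rest (out ++ [t]) (used + (t.length : Int))

def limit_chars (items : List (List (String × String))) (key : String) (cap : Int) : List String :=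
  pvGoA key cap items [] 0

-- ===== PORT B =====
-- sums: the prefix-sum loop (s += len(t); sums.append(s))
def pvSumsB : List String → Int → List Int
  | [], _ => []
  | t :: r, s => (s + (t.length : Int)) :: pvSumsB r (s + (t.length : Int))

-- the while loop: k advances while sums[k] <= cap
def pvCountB (cap : Int) : List Int → Nat
  | [] => 0
  | x :: r => if x ≤ cap then pvCountB cap r + 1 else 0

def limit_chars_alt (items : List (List (String × String))) (key : String) (cap : Int) : List String :=
  let texts := (items.map (fun it => pvStripOf it key)).filter (fun t => t ≠ "")
  let sums := pvSumsB texts 0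
  let k := pvCountB cap sums
  texts.take k

-- ===== PRECONDITION & SPEC =====
def Spec_limit_chars (items : List (List (String × String))) (key : String) (cap : Int) (out : List String) : Prop := out = limit_chars_alt items key cap
instance (items : List (List (String × String))) (key : String) (cap : Int) (out : List String) : Decidable (Spec_limit_chars items key cap out) := by unfold Spec_limit_chars; infer_instance

-- ===== CLAIM (what is proved, stated in full; the proofs are below) =====
def Claim_equal_limit_chars : Prop := ∀ (items : List (List (String × String))) (key : String) (cap : Int), Dom_limit_chars items key cap → Spec_limit_chars items key cap (limit_chars items key cap)

-- ===== LEMMAS AND PROOFS =====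

-- common characterisation: process the filtered texts with a running total, stop at first overflow
def pvCore (cap : Int) : List String → Int → List String
  | [], _ => []
  | t :: r, used =>
    if used + (t.length : Int) > cap then []
    else t :: pvCore cap r (used + (t.length : Int))

lemma pvGoA_eq_core (key : String) (cap : Int) :
    ∀ (items : List (List (String × String))) (out : List String) (used : Int),
      pvGoA key cap items out used =
        out ++ pvCore cap ((items.map (fun it => pvStripOf it key)).filter (fun t => t ≠ "")) used := by
  intro items
  induction items with
  | nil => intro out used; simp [pvGoA, pvCore]
  | cons it rest ih =>
    intro out used
    simp only [pvGoA, List.map_cons, List.filter_cons]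
    generalize pvStripOf it key = t
    by_cases h : t = ""
    · simp [h, ih]
    · by_cases hc : used + ((t).length : Int) > cap
      · simp [h, hc, pvCore]
      · simp [h, hc, pvCore, ih]

lemma take_count_eq_core (cap : Int) :
    ∀ (ts : List String) (s : Int),
      ts.take (pvCountB cap (pvSumsB ts s)) = pvCore cap ts s := by
  intro ts
  induction ts with
  | nil => intro s; simp [pvSumsB, pvCountB, pvCore]
  | cons t r ih =>
    intro s
    simp only [pvSumsB, pvCountB, pvCore]
    by_cases hc : s + (t.length : Int) ≤ cap
    · have h2 : ¬ s + (t.length : Int) > cap := by omega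
      simp [hc, h2, ih]
    · have h2 : s + (t.length : Int) > cap := by omega
      simp [hc, h2]

-- ===== VERDICT (by name: the statement is the Claim_ definition above) =====
theorem limit_chars_spec : Claim_equal_limit_chars := by
  intro items key cap _
  show limit_chars items key cap = limit_chars_alt items key cap
  simp [limit_chars, limit_chars_alt, pvGoA_eq_core, take_count_eq_core]
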